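-- pv_equiv track=rewrite | github.com/dcrosta/shrt | shrt/db/__init__.py | shortstr
-- ===== SOURCE A (Python) =====
-- digit='abcdefghijklmnopqrstuvwxyzABCDEFGHIJKLMNOPQRSTUVWXYZ0123456789'
--
-- count=len(digit)
--
-- def shortstr(num, deep=False):
--     """
--     >>> shortstr(0)
--     >>> shortstr(1)
--     'a'
--     >>> shortstr(2)
--     'b'
--     >>> shortstr(62)
--     '9'
--     >>> shortstr(63)
--     'aa'
--     >>> shortstr(64)
--     'ab'
--     >>> shortstr(1923123)
--     'hdrg'
--     """
--     if num <= 0: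
--         return None
--     out = []
--     while num:
--         num, mod = divmod(num-1, count)
--         out.append(digit[mod])
--     return ''.join(reversed(out))
-- ===== SOURCE B (Python) =====
-- digit='abcdefghijklmnopqrstuvwxyzABCDEFGHIJKLMNOPQRSTUVWXYZ0123456789'
--
-- count=len(digit)
--
-- def shortstr(num, deep=False):
--     if num <= 0:
--         return None
--     # Phase 1: find the output length and the count of all shorter strings.
--     length = 1
--     base = 0
--     while num > base + count ** length:
--         base += count ** length
--         length += 1
--     # Phase 2: ordinary fixed-width base-62 conversion of the offset
--     # within the length-`length` block ('a' = 0 pads on the left).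
--     offset = num - base - 1
--     out = ''
--     for _ in range(length):
--         out = digit[offset % count] + out
--         offset //= count
--     return out
-- ===== Notes on version B (the rewrite author's own statement) =====
-- stated objective: alternative
-- what changed: Replaces the single digit-extraction loop with append-to-list and reverse-and-join by a two-phase algorithm: first find the output length (and the count of all shorter strings) by summing powers of 62, then do an ordinary fixed-width positional base-62 conversion of the offset within that length block, prepending each character to a string.
import Mathlib
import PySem

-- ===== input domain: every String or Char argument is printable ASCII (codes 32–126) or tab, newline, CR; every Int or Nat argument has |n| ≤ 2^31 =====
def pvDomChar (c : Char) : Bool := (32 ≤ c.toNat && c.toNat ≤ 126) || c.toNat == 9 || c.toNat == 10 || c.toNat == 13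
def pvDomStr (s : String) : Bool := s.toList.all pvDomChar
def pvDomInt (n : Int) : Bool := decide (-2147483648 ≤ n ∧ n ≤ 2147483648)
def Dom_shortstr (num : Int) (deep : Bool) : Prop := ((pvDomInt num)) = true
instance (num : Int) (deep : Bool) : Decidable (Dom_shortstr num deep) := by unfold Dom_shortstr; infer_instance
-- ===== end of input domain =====

-- B finds the output length first and then does a fixed-width positional base-62 conversion of the in-block offset, instead of A's append-then-reverse digit-extraction loop; equal return values.


-- ===== PORT A =====
-- the module constant `digit` as a list of characters
def pvDigits : List Char := "abcdefghijklmnopqrstuvwxyzABCDEFGHIJKLMNOPQRSTUVWXYZ0123456789".toList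

-- A's while loop. It only runs with num > 0 (A returns None before the loop otherwise),
-- and `num` stays nonnegative, so it is carried as a Nat; on nonnegative operands Nat
-- division/modulo coincide exactly with Python's divmod, and digit[(num-1)%62] is in
-- range, so getD never takes the default.
def shortstrLoopA (num : Nat) (out : List Char) : List Char :=
  if num = 0 then out
  else shortstrLoopA ((num - 1) / 62) (out ++ [pvDigits.getD ((num - 1) % 62) ' '])
termination_by num
decreasing_by
  have h := Nat.div_le_self (num - 1) 62
  omega

def shortstr (num : Int) (deep : Bool) : Option String :=
  if num ≤ 0 then none
  else some (String.ofList (shortstrLoopA num.toNat []).reverse)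

-- ===== PORT B =====
-- B's phase-1 while loop: grow `length` (and `base`, the number of strings shorter
-- than `length`) until num fits in the length block. Runs with 0 < num only, so state
-- is carried as Nats; terminates because base strictly approaches num.
def findLenB (num L base : Nat) : Nat × Nat :=
  if num > base + 62 ^ L then findLenB num (L + 1) (base + 62 ^ L) else (L, base)
termination_by num - base
decreasing_by
  have h : 1 ≤ 62 ^ L := Nat.one_le_pow _ _ (by omega)
  omega

-- B's phase-2 for loop: `length` iterations, each prepending digit[offset % 62] and
-- flooring offset by 62 (exact: all operands nonnegative).
def convLoopB (L : Nat) (out : List Char) (off : Nat) : List Char :=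
  match L with
  | 0 => out
  | L + 1 => convLoopB L (pvDigits.getD (off % 62) ' ' :: out) (off / 62)

def shortstr_alt (num : Int) (deep : Bool) : Option String :=
  if num ≤ 0 then none
  else
    let p := findLenB num.toNat 1 0
    some (String.ofList (convLoopB p.1 [] (num.toNat - p.2 - 1)))

-- ===== PRECONDITION & SPEC =====
def Spec_shortstr (num : Int) (deep : Bool) (out : Option String) : Prop := out = shortstr_alt num deep
instance (num : Int) (deep : Bool) (out : Option String) : Decidable (Spec_shortstr num deep out) := by unfold Spec_shortstr; infer_instance

-- ===== CLAIM (what is proved, stated in full; the proofs are below) =====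
def Claim_equal_shortstr : Prop := ∀ (num : Int) (deep : Bool), Dom_shortstr num deep → Spec_shortstr num deep (shortstr num deep)

-- ===== LEMMAS AND PROOFS =====

-- the clean recursive characterisation both ports are reduced to
def bijChars (num : Nat) : List Char :=
  let q := (num - 1) / 62
  let m := (num - 1) % 62
  if q = 0 then [pvDigits.getD m ' ']
  else bijChars q ++ [pvDigits.getD m ' ']
termination_by num
decreasing_by
  have h := Nat.div_le_self (num - 1) 62
  omega

-- S L = 62 + 62^2 + ... + 62^L, the number of nonempty strings of length ≤ L
def Sgeom : Nat → Nat
  | 0 => 0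
  | n + 1 => Sgeom n + 62 ^ (n + 1)

theorem Sgeom_succ (n : Nat) : Sgeom (n + 1) = 62 * (Sgeom n + 1) := by
  induction n with
  | zero => simp [Sgeom]
  | succ n ih =>
    show Sgeom (n + 1) + 62 ^ (n + 2) = 62 * (Sgeom (n + 1) + 1)
    conv_rhs => rw [show Sgeom (n + 1) = Sgeom n + 62 ^ (n + 1) from rfl]
    rw [ih, pow_succ]
    ring

-- ---- A's loop equals bijChars ----
theorem shortstrLoopA_append (num : Nat) : ∀ out, shortstrLoopA num out = out ++ shortstrLoopA num [] := by
  induction num using Nat.strong_induction_on with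
  | _ num ih =>
    intro out
    conv_lhs => rw [shortstrLoopA]
    conv_rhs => rw [shortstrLoopA]
    by_cases h : num = 0
    · simp [h]
    · simp only [h, if_false]
      have hlt : (num - 1) / 62 < num := by
        have := Nat.div_le_self (num - 1) 62
        omega
      rw [ih _ hlt (out ++ [pvDigits.getD ((num - 1) % 62) ' ']),
          ih _ hlt ([] ++ [pvDigits.getD ((num - 1) % 62) ' '])]
      simp

theorem loopA_eq_bij (num : Nat) (h : num ≠ 0) :
    (shortstrLoopA num []).reverse = bijChars num := by
  induction num using Nat.strong_induction_on with
  | _ num ih =>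
    conv_lhs => rw [shortstrLoopA]
    rw [bijChars]
    simp only [h, if_false]
    rw [shortstrLoopA_append]
    by_cases hq : (num - 1) / 62 = 0
    · rw [hq]
      conv_lhs => rw [shortstrLoopA]
      simp
    · have hlt : (num - 1) / 62 < num := by
        have := Nat.div_le_self (num - 1) 62
        omega
      simp only [hq, if_false, List.reverse_append]
      rw [ih _ hlt hq]
      simp

-- ---- B's loops equal bijChars ----
theorem convLoopB_append (L : Nat) : ∀ out off, convLoopB L out off = convLoopB L [] off ++ out := by
  induction L with
  | zero => intro out off; simp [convLoopB]
  | succ L ih =>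
    intro out off
    show convLoopB L _ _ = convLoopB L _ _ ++ out
    rw [ih (pvDigits.getD (off % 62) ' ' :: out), ih [pvDigits.getD (off % 62) ' ']]
    simp

theorem findLenB_spec (num : Nat) (hnum : 0 < num) :
    ∀ L base, 1 ≤ L → base = Sgeom (L - 1) → base < num →
      (findLenB num L base).2 = Sgeom ((findLenB num L base).1 - 1) ∧
      1 ≤ (findLenB num L base).1 ∧
      (findLenB num L base).2 < num ∧
      num ≤ (findLenB num L base).2 + 62 ^ (findLenB num L base).1 := by
  intro L base
  induction L, base using findLenB.induct num with
  | case1 L base hgt ih =>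
    intro hL hbase hlt
    rw [findLenB, if_pos hgt]
    refine ih (by omega) ?_ (by omega)
    have : L - 1 + 1 = L := by omega
    rw [show L + 1 - 1 = L from rfl, ← this, Sgeom, this, hbase]
  | case2 L base hgt =>
    intro hL hbase hlt
    rw [findLenB, if_neg hgt]
    exact ⟨hbase, hL, hlt, by show num ≤ base + 62 ^ L; omega⟩

theorem convB_eq_bij : ∀ (L num : Nat), 1 ≤ L → Sgeom (L - 1) < num → num ≤ Sgeom (L - 1) + 62 ^ L →
    convLoopB L [] (num - Sgeom (L - 1) - 1) = bijChars num := by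
  intro L
  induction L with
  | zero => intro num h; omega
  | succ L ih =>
    intro num _ hlo hhi
    match L, ih with
    | 0, _ =>
      -- length 1: 0 < num ≤ 62
      simp only [Sgeom] at hlo hhi
      rw [bijChars]
      have hq : (num - 1) / 62 = 0 := by omega
      simp only [hq]
      show convLoopB 0 [pvDigits.getD ((num - 0 - 1) % 62) ' '] ((num - 0 - 1) / 62) = _
      have : (num - 0 - 1) % 62 = (num - 1) % 62 := by omega
      rw [this]
      rfl
    | L + 1, ih =>
      -- length L+2 ≥ 2
      have hS : Sgeom (L + 1) = 62 * (Sgeom L + 1) := Sgeom_succ L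
      have hP : 62 ^ (L + 2) = 62 * 62 ^ (L + 1) := by rw [pow_succ]; ring
      have hP1 : 1 ≤ 62 ^ (L + 1) := Nat.one_le_pow _ _ (by omega)
      rw [show L + 1 + 1 - 1 = L + 1 from rfl] at hlo hhi ⊢
      set a := Sgeom L with ha
      set q := (num - 1) / 62 with hqdef
      -- arithmetic facts
      have hnum1 : num - Sgeom (L + 1) - 1 = num - 1 - 62 * (a + 1) := by omega
      have hmod : (num - Sgeom (L + 1) - 1) % 62 = (num - 1) % 62 := by
        rw [hnum1]; omega
      have hdiv : (num - Sgeom (L + 1) - 1) / 62 = q - a - 1 := by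
        rw [hnum1, hqdef]; omega
      have hqlo : a < q := by rw [hqdef]; omega
      have hqhi : q ≤ a + 62 ^ (L + 1) := by rw [hqdef]; omega
      have hqne : q ≠ 0 := by omega
      rw [bijChars]
      simp only [← hqdef, hqne, if_false]
      show convLoopB (L + 1) [pvDigits.getD ((num - Sgeom (L + 1) - 1) % 62) ' ']
          ((num - Sgeom (L + 1) - 1) / 62) = _
      rw [convLoopB_append, hmod, hdiv]
      congr 1
      have := ih q (by omega) (by rw [show L + 1 - 1 = L from rfl]; omega)
        (by rw [show L + 1 - 1 = L from rfl]; omega)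
      rw [show L + 1 - 1 = L from rfl] at this
      rw [show q - a - 1 = q - Sgeom L - 1 from rfl] at this
      exact this

-- ===== VERDICT (by name: the statement is the Claim_ definition above) =====
theorem shortstr_spec : Claim_equal_shortstr := by
  intro num deep _
  unfold Spec_shortstr shortstr shortstr_alt
  by_cases h : num ≤ 0
  · simp [h]
  · have hn : 0 < num.toNat := by omega
    have hspec := findLenB_spec num.toNat hn 1 0 (le_refl 1) (by simp [Sgeom]) hn
    obtain ⟨hb, hL1, hlt, hle⟩ := hspec
    simp only [h, if_false]
    rw [loopA_eq_bij num.toNat (by omega)]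
    rw [← convB_eq_bij (findLenB num.toNat 1 0).1 num.toNat hL1 (by omega) (by omega)]
    rw [← hb]
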